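-- pv_equiv track=rewrite | github.com/zimolab/PyGUIAdapter | pyguiadapter/widgets/extend/stringlist.py | _keep_one_empty_item
-- ===== SOURCE A (Python) =====
-- from typing import Type, List, Literal, Optional, Any
--
-- def _keep_one_empty_item(items: List[str]) -> List[str]:
--     should_add = True
--     ret = []
--     for item in items:
--         if item is None:
--             item = ""
--         item = str(item)
--         if item != "":
--             ret.append(item)
--             continue
--         # if item == "" and
--         if should_add:
--             ret.append(item)
--             should_add = False
--     return ret
-- ===== SOURCE B (Python) =====
-- def _keep_one_empty_item(items):
--     normalized = ["" if x is None else str(x) for x in items]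
--     result = [x for x in normalized if x != ""]
--     if "" in normalized:
--         result.insert(normalized.index(""), "")
--     return result
-- ===== Notes on version B (the rewrite author's own statement) =====
-- stated objective: simpler
-- what changed: Replaces the stateful loop with a should_add flag by a filter of the non-empty items plus a single insert of "" at the index of the first empty item (correct because everything before the first empty survives the filter).
import Mathlib
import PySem

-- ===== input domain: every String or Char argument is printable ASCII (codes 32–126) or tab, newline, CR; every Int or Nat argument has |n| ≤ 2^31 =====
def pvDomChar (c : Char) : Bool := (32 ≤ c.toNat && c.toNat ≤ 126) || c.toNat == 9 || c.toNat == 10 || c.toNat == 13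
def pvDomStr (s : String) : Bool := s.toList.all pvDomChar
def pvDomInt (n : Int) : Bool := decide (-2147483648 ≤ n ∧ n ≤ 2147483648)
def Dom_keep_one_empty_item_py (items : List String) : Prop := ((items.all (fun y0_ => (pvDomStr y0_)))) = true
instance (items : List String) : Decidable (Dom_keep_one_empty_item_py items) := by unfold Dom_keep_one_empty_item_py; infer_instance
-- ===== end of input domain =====

-- B replaces A's stateful should_add loop by filter + one insert of "" at the first-empty index (objective: simpler).


-- ===== PORT A =====
-- the for loop, carrying should_add and ret (items are already strings, so the None/str(...) normalisation is the identity)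
def keepLoopA (should_add : Bool) (ret : List String) : List String → List String
  | [] => ret
  | item :: rest =>
      if item ≠ "" then keepLoopA should_add (ret ++ [item]) rest
      else if should_add then keepLoopA false (ret ++ [item]) rest
      else keepLoopA should_add ret rest

def keep_one_empty_item_py (items : List String) : List String :=
  keepLoopA true [] items

-- ===== PORT B =====
def keep_one_empty_item_py_alt (items : List String) : List String :=
  let normalized := items   -- items are strings already: "" if x is None else str(x) is the identity
  let result := normalized.filter (fun x => x ≠ "")
  match PySem.List.index? normalized "" with   -- '"" in normalized' + normalized.index("")
  | some i => PySem.List.insert result (i : Int) ""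
  | none => result

-- ===== PRECONDITION & SPEC =====
def Spec_keep_one_empty_item_py (items : List String) (out : List String) : Prop := out = keep_one_empty_item_py_alt items
instance (items : List String) (out : List String) : Decidable (Spec_keep_one_empty_item_py items out) := by unfold Spec_keep_one_empty_item_py; infer_instance

-- ===== CLAIM (what is proved, stated in full; the proofs are below) =====
def Claim_equal_keep_one_empty_item_py : Prop := ∀ (items : List String), Dom_keep_one_empty_item_py items → Spec_keep_one_empty_item_py items (keep_one_empty_item_py items)

-- ===== LEMMAS AND PROOFS =====

-- once should_add is false, the loop is just the filter of the rest
theorem keepLoopA_false (items : List String) : ∀ (ret : List String),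
    keepLoopA false ret items = ret ++ items.filter (fun x => x ≠ "") := by
  induction items with
  | nil => intro ret; simp [keepLoopA]
  | cons x xs ih =>
      intro ret
      by_cases hx : x = ""
      · subst hx; simp [keepLoopA, ih]
      · simp [keepLoopA, hx, ih]

-- the index of the first "" never exceeds the length of the filtered list
theorem index_le_filter_length (items : List String) : ∀ (i : Nat),
    PySem.List.index? items "" = some i → i ≤ (items.filter (fun x => x ≠ "")).length := by
  induction items with
  | nil => intro i h; simp [PySem.List.index?_eq_idxOf?] at h
  | cons x xs ih =>
      intro i h
      by_cases hx : x = ""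
      · subst hx
        rw [PySem.List.index?_cons_self] at h
        simp at h
        omega
      · rw [PySem.List.index?_cons_of_ne xs hx] at h
        rcases Option.map_eq_some_iff.mp h with ⟨j, hj, rfl⟩
        have := ih j hj
        rw [List.filter_cons_of_pos (by simp [hx])]
        simp only [List.length_cons]
        omega

-- inserting at position i+1 of a cons, given i in range
theorem insert_succ_cons (x v : String) (r : List String) (i : Nat) (h : i ≤ r.length) :
    PySem.List.insert (x :: r) ((i : Int) + 1) v = x :: PySem.List.insert r (i : Int) v := by
  have h1 : ((i : Int) + 1) = ((i + 1 : Nat) : Int) := by push_cast; ring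
  rw [h1, PySem.List.insert_natCast _ _ _ (by simpa using Nat.succ_le_succ h),
      PySem.List.insert_natCast _ _ _ h]
  simp

theorem keepLoopA_true (items : List String) : ∀ (ret : List String),
    keepLoopA true ret items = ret ++ keep_one_empty_item_py_alt items := by
  induction items with
  | nil => intro ret; simp [keepLoopA, keep_one_empty_item_py_alt, PySem.List.index?_eq_idxOf?, List.idxOf?]
  | cons x xs ih =>
      intro ret
      by_cases hx : x = ""
      · subst hx
        simp only [keepLoopA, ne_eq, not_true_eq_false, if_false, if_true]
        rw [keepLoopA_false]
        unfold keep_one_empty_item_py_alt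
        dsimp only
        rw [PySem.List.index?_cons_self]
        simp [PySem.List.insert_zero]
      · simp only [keepLoopA, ne_eq, hx, not_false_eq_true, if_true]
        rw [ih]
        conv_rhs => unfold keep_one_empty_item_py_alt
        dsimp only
        rw [PySem.List.index?_cons_of_ne xs hx]
        simp only [List.filter_cons, ne_eq, hx, not_false_eq_true, decide_true, if_true]
        cases hidx : PySem.List.index? xs "" with
        | none =>
            unfold keep_one_empty_item_py_alt
            dsimp only
            rw [hidx]
            simp
        | some i =>
            conv_lhs => unfold keep_one_empty_item_py_alt
            dsimp only
            rw [hidx]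
            have h1 : ((i + 1 : Nat) : Int) = (i : Int) + 1 := by push_cast; ring
            simp only [Option.map_some, h1]
            rw [insert_succ_cons _ _ _ _ (index_le_filter_length xs i hidx)]
            simp

-- ===== VERDICT (by name: the statement is the Claim_ definition above) =====
theorem keep_one_empty_item_py_spec : Claim_equal_keep_one_empty_item_py := by
  intro items _
  unfold Spec_keep_one_empty_item_py keep_one_empty_item_py
  simpa using keepLoopA_true items []
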